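-- pv_equiv track=rewrite | github.com/Heltev/adventofcode_2023 | 2/day2.py | find_offenders
-- ===== SOURCE A (Python) =====
-- def find_offenders(game_dict,max_dice):
--   too_high = 0
--   id_sum = 0
--   for game,draws in game_dict.items():
--     too_high = 0
--     for round,color in draws.items():
--       minimum_dice = {'red': 0, 'green': 0, 'blue': 0}
--       for draw in color.split(','):
--         current_draw = draw.strip().split(' ')
--         too_high += check_if_too_many(current_draw,max_dice)
--     if too_high < 1: id_sum += game
--   return id_sum
--
-- def check_if_too_many(draw,max_dice):
--   if int(draw[0]) > max_dice[draw[1]]: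
--     return 1
--   return 0
-- ===== SOURCE B (Python) =====
-- def find_offenders(game_dict, max_dice):
--     id_sum = 0
--     for game, draws in game_dict.items():
--         seen = {}
--         for color in draws.values():
--             for chunk in color.split(','):
--                 parts = chunk.strip().split(' ')
--                 count = int(parts[0])
--                 col = parts[1]
--                 seen[col] = max(seen.get(col, count), count)
--         if all(v <= max_dice[c] for c, v in seen.items()):
--             id_sum += game
--     return id_sum
-- ===== Notes on version B (the rewrite author's own statement) =====
-- stated objective: alternative
-- what changed: Instead of counting per-chunk limit violations as it scans (A), B builds a per-game dict of the maximum count drawn per color and checks the whole table against max_dice once at the end of the game.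
import Mathlib
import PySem

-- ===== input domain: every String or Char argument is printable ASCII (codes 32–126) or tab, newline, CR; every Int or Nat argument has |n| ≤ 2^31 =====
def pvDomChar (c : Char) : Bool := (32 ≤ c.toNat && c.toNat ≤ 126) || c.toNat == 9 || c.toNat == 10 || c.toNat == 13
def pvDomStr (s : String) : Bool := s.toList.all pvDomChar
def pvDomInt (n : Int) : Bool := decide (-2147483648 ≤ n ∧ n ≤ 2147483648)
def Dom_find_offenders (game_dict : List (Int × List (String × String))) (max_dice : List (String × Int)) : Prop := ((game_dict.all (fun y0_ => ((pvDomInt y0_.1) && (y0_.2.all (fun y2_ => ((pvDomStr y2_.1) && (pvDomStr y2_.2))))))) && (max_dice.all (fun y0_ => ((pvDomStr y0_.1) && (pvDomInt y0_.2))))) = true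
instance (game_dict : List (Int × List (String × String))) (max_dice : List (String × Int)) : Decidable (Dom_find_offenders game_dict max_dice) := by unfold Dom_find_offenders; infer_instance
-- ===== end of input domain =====

-- B replaces A's per-chunk violation counter by a per-game dict of per-color maxima checked
-- against the limits once at the end of each game (objective: alternative structure, same cost).

-- ===== PORT A =====
def check_if_too_many (draw : List String) (max_dice : List (String × Int)) : Int :=
  -- int(draw[0]) and max_dice[draw[1]] are total here only under Pre_ (else Python raises)
  if (PySem.Int.ofStr? (PySem.List.pyGetD draw 0 "")).getD 0
       > (PySem.Dict.mk max_dice).getD (PySem.List.pyGetD draw 1 "") 0 then 1 else 0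

def find_offenders (game_dict : List (Int × List (String × String))) (max_dice : List (String × Int)) : Int :=
  game_dict.foldl (fun id_sum g =>
    let too_high : Int := g.2.foldl (fun th rc =>
      ((PySem.Str.split? rc.2 ",").getD []).foldl (fun th draw =>
        th + check_if_too_many ((PySem.Str.split? (PySem.Str.strip draw) " ").getD []) max_dice) th) 0
    if too_high < 1 then id_sum + g.1 else id_sum) 0

-- ===== PORT B =====
def find_offenders_alt (game_dict : List (Int × List (String × String))) (max_dice : List (String × Int)) : Int :=
  game_dict.foldl (fun id_sum g =>
    let seen : PySem.Dict String Int := g.2.foldl (fun seen rc =>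
      ((PySem.Str.split? rc.2 ",").getD []).foldl (fun seen chunk =>
        let parts := (PySem.Str.split? (PySem.Str.strip chunk) " ").getD []
        let count := (PySem.Int.ofStr? (PySem.List.pyGetD parts 0 "")).getD 0
        let col := PySem.List.pyGetD parts 1 ""
        seen.insert col (max (seen.getD col count) count)) seen) PySem.Dict.empty
    if seen.items.all (fun cv => cv.2 ≤ (PySem.Dict.mk max_dice).getD cv.1 0) then id_sum + g.1 else id_sum) 0

-- ===== PRECONDITION & SPEC =====
-- Pre_ excludes exactly the inputs on which Python A raises: a chunk whose first
-- space-field is not an int literal (ValueError), has no second field (IndexError),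
-- or names a color absent from max_dice (KeyError).
def pvChunkOK (max_dice : List (String × Int)) (chunk : String) : Bool :=
  let parts := (PySem.Str.split? (PySem.Str.strip chunk) " ").getD []
  (PySem.Int.ofStr? (PySem.List.pyGetD parts 0 "")).isSome
    && decide (2 ≤ parts.length)
    && (PySem.Dict.mk max_dice).contains (PySem.List.pyGetD parts 1 "")

def Pre_find_offenders (game_dict : List (Int × List (String × String))) (max_dice : List (String × Int)) : Prop :=
  (game_dict.all (fun g => g.2.all (fun rc =>
    ((PySem.Str.split? rc.2 ",").getD []).all (pvChunkOK max_dice)))) = true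

instance (game_dict : List (Int × List (String × String))) (max_dice : List (String × Int)) : Decidable (Pre_find_offenders game_dict max_dice) := by unfold Pre_find_offenders; infer_instance

def pvWitness_find_offenders : (List (Int × List (String × String))) × (List (String × Int)) :=
  ([(1, [("1", "3 red, 4 blue"), ("2", "2 green")]), (2, [("1", "9 red")])], [("red", 5), ("green", 5), ("blue", 5)])

def Spec_find_offenders (game_dict : List (Int × List (String × String))) (max_dice : List (String × Int)) (out : Int) : Prop := out = find_offenders_alt game_dict max_dice
instance (game_dict : List (Int × List (String × String))) (max_dice : List (String × Int)) (out : Int) : Decidable (Spec_find_offenders game_dict max_dice out) := by unfold Spec_find_offenders; infer_instance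

-- ===== CLAIM (what is proved, stated in full; the proofs are below) =====
def Claim_equal_find_offenders : Prop := ∀ (game_dict : List (Int × List (String × String))) (max_dice : List (String × Int)), Dom_find_offenders game_dict max_dice → Pre_find_offenders game_dict max_dice → Spec_find_offenders game_dict max_dice (find_offenders game_dict max_dice)

-- ===== LEMMAS AND PROOFS =====

-- parsed (color, count) of one comma-chunk
def pvParse (chunk : String) : String × Int :=
  let parts := (PySem.Str.split? (PySem.Str.strip chunk) " ").getD []
  (PySem.List.pyGetD parts 1 "", (PySem.Int.ofStr? (PySem.List.pyGetD parts 0 "")).getD 0)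

def pvLim (max_dice : List (String × Int)) (c : String) : Int := (PySem.Dict.mk max_dice).getD c 0

def pvInd (max_dice : List (String × Int)) (p : String × Int) : Int :=
  if p.2 > pvLim max_dice p.1 then 1 else 0

def pvStep (d : PySem.Dict String Int) (p : String × Int) : PySem.Dict String Int :=
  d.insert p.1 (max (d.getD p.1 p.2) p.2)

def pvChunks (draws : List (String × String)) : List (String × Int) :=
  (draws.flatMap (fun rc => (PySem.Str.split? rc.2 ",").getD [])).map pvParse

theorem pvChunks_cons (rc : String × String) (t : List (String × String)) :
    pvChunks (rc :: t) = ((PySem.Str.split? rc.2 ",").getD []).map pvParse ++ pvChunks t := by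
  simp [pvChunks]

theorem pvParse_fst (chunk : String) :
    (pvParse chunk).1 = PySem.List.pyGetD ((PySem.Str.split? (PySem.Str.strip chunk) " ").getD []) 1 "" := by
  simp [pvParse]

theorem pvParse_snd (chunk : String) :
    (pvParse chunk).2 = (PySem.Int.ofStr? (PySem.List.pyGetD ((PySem.Str.split? (PySem.Str.strip chunk) " ").getD []) 0 "")).getD 0 := by
  simp [pvParse]

theorem pvCheck_eq (md : List (String × Int)) (draw : String) :
    check_if_too_many ((PySem.Str.split? (PySem.Str.strip draw) " ").getD []) md = pvInd md (pvParse draw) := by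
  unfold check_if_too_many pvInd pvLim
  rw [pvParse_fst, pvParse_snd]

theorem pvStepChunk_eq (seen : PySem.Dict String Int) (chunk : String) :
    (let parts := (PySem.Str.split? (PySem.Str.strip chunk) " ").getD []
     let count := (PySem.Int.ofStr? (PySem.List.pyGetD parts 0 "")).getD 0
     let col := PySem.List.pyGetD parts 1 ""
     seen.insert col (max (seen.getD col count) count)) = pvStep seen (pvParse chunk) := by
  unfold pvStep
  rw [pvParse_fst, pvParse_snd]

theorem pvA_inner (md : List (String × Int)) (l : List String) (i : Int) :
    l.foldl (fun th draw =>
        th + check_if_too_many ((PySem.Str.split? (PySem.Str.strip draw) " ").getD []) md) i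
      = (l.map pvParse).foldl (fun th p => th + pvInd md p) i := by
  induction l generalizing i with
  | nil => rfl
  | cons c t ih =>
      rw [List.map_cons, List.foldl_cons, List.foldl_cons, pvCheck_eq md c, ih]

theorem pvA_flat (md : List (String × Int)) (draws : List (String × String)) (i : Int) :
    draws.foldl (fun th rc =>
      ((PySem.Str.split? rc.2 ",").getD []).foldl (fun th draw =>
        th + check_if_too_many ((PySem.Str.split? (PySem.Str.strip draw) " ").getD []) md) th) i
    = (pvChunks draws).foldl (fun th p => th + pvInd md p) i := by
  induction draws generalizing i with
  | nil => rfl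
  | cons rc t ih =>
      rw [List.foldl_cons, ih, pvChunks_cons, List.foldl_append]
      congr 1
      exact pvA_inner md _ i

theorem pvB_inner (l : List String) (d : PySem.Dict String Int) :
    l.foldl (fun seen chunk =>
        let parts := (PySem.Str.split? (PySem.Str.strip chunk) " ").getD []
        let count := (PySem.Int.ofStr? (PySem.List.pyGetD parts 0 "")).getD 0
        let col := PySem.List.pyGetD parts 1 ""
        seen.insert col (max (seen.getD col count) count)) d
      = (l.map pvParse).foldl pvStep d := by
  induction l generalizing d with
  | nil => rfl
  | cons c t ih =>
      rw [List.map_cons, List.foldl_cons, List.foldl_cons, pvStepChunk_eq d c, ih]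

theorem pvB_flat (draws : List (String × String)) (d : PySem.Dict String Int) :
    draws.foldl (fun seen rc =>
      ((PySem.Str.split? rc.2 ",").getD []).foldl (fun seen chunk =>
        let parts := (PySem.Str.split? (PySem.Str.strip chunk) " ").getD []
        let count := (PySem.Int.ofStr? (PySem.List.pyGetD parts 0 "")).getD 0
        let col := PySem.List.pyGetD parts 1 ""
        seen.insert col (max (seen.getD col count) count)) seen) d
    = (pvChunks draws).foldl pvStep d := by
  induction draws generalizing d with
  | nil => rfl
  | cons rc t ih =>
      rw [List.foldl_cons, ih, pvChunks_cons, List.foldl_append]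
      congr 1
      exact pvB_inner _ d

theorem pvInd_nonneg (md : List (String × Int)) (p : String × Int) : 0 ≤ pvInd md p := by
  unfold pvInd; split <;> omega

theorem pvFoldl_ind_nonneg (md : List (String × Int)) (ps : List (String × Int)) (i : Int) (hi : 0 ≤ i) :
    0 ≤ ps.foldl (fun th p => th + pvInd md p) i := by
  induction ps generalizing i with
  | nil => simpa
  | cons h t ih => exact ih (i + pvInd md h) (by have := pvInd_nonneg md h; omega)

theorem pvFoldl_ind_shift (md : List (String × Int)) (ps : List (String × Int)) (a b : Int) :
    ps.foldl (fun th p => th + pvInd md p) (a + b) = ps.foldl (fun th p => th + pvInd md p) a + b := by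
  induction ps generalizing a with
  | nil => rfl
  | cons h t ih =>
      rw [List.foldl_cons, List.foldl_cons]
      have : a + b + pvInd md h = (a + pvInd md h) + b := by ring
      rw [this, ih]

theorem pvA_zero_iff (md : List (String × Int)) (ps : List (String × Int)) :
    (ps.foldl (fun th p => th + pvInd md p) 0 < 1) ↔ ∀ p ∈ ps, p.2 ≤ pvLim md p.1 := by
  induction ps with
  | nil => simp
  | cons h t ih =>
      rw [List.foldl_cons]
      have hshift : t.foldl (fun th p => th + pvInd md p) (0 + pvInd md h)
          = t.foldl (fun th p => th + pvInd md p) 0 + pvInd md h := pvFoldl_ind_shift md t 0 (pvInd md h)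
      have hnn := pvInd_nonneg md h
      have hf := pvFoldl_ind_nonneg md t 0 le_rfl
      constructor
      · intro hlt
        rw [hshift] at hlt
        have hh0 : pvInd md h = 0 := by omega
        have ht0 : t.foldl (fun th p => th + pvInd md p) 0 < 1 := by omega
        intro p hp
        rcases List.mem_cons.mp hp with rfl | hp'
        · by_contra hgt
          simp [pvInd, show p.2 > pvLim md p.1 by omega] at hh0
        · exact (ih.mp ht0) p hp'
      · intro hall
        have hh0 : pvInd md h = 0 := by
          have := hall h List.mem_cons_self
          simp [pvInd]
          omega
        rw [hshift, hh0]
        have := ih.mpr (fun p hp => hall p (List.mem_cons_of_mem _ hp))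
        omega

theorem pvStep_get?_mono (ps : List (String × Int)) (d : PySem.Dict String Int) (c : String) (v : Int)
    (h : d.get? c = some v) : ∃ v', (ps.foldl pvStep d).get? c = some v' ∧ v ≤ v' := by
  induction ps generalizing d v with
  | nil => exact ⟨v, h, le_rfl⟩
  | cons p t ih =>
      rw [List.foldl_cons]
      by_cases hc : c = p.1
      · have hgd : d.getD p.1 p.2 = v := by
          rw [hc] at h; exact PySem.Dict.getD_of_get?_eq_some d p.2 h
        have hget : (pvStep d p).get? c = some (max (d.getD p.1 p.2) p.2) := by
          unfold pvStep
          rw [PySem.Dict.get?_insert, if_pos hc]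
        rcases ih (pvStep d p) _ hget with ⟨v', hv', hle⟩
        refine ⟨v', hv', ?_⟩
        have := le_max_left (d.getD p.1 p.2) p.2
        omega
      · have hget : (pvStep d p).get? c = some v := by
          unfold pvStep
          rw [PySem.Dict.get?_insert, if_neg hc]
          exact h
        exact ih (pvStep d p) v hget

theorem pvStep_covers (ps : List (String × Int)) (d : PySem.Dict String Int) (p : String × Int) :
    p ∈ ps → ∃ v, (ps.foldl pvStep d).get? p.1 = some v ∧ p.2 ≤ v := by
  induction ps generalizing d with
  | nil => intro hp; cases hp
  | cons q t ih =>
      intro hp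
      rw [List.foldl_cons]
      rcases List.mem_cons.mp hp with rfl | hp'
      · have hget : (pvStep d p).get? p.1 = some (max (d.getD p.1 p.2) p.2) := by
          unfold pvStep
          rw [PySem.Dict.get?_insert, if_pos rfl]
        rcases pvStep_get?_mono t (pvStep d p) p.1 _ hget with ⟨v', hv', hle⟩
        refine ⟨v', hv', ?_⟩
        have := le_max_right (d.getD p.1 p.2) p.2
        omega
      · exact ih (pvStep d q) hp'

theorem pvStep_bounded (md : List (String × Int)) (ps : List (String × Int)) (d : PySem.Dict String Int)
    (hd : ∀ cv ∈ d.items, cv.2 ≤ pvLim md cv.1)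
    (hps : ∀ p ∈ ps, p.2 ≤ pvLim md p.1) :
    ∀ cv ∈ (ps.foldl pvStep d).items, cv.2 ≤ pvLim md cv.1 := by
  induction ps generalizing d with
  | nil => simpa using hd
  | cons p t ih =>
      rw [List.foldl_cons]
      refine ih (pvStep d p) ?_ (fun q hq => hps q (List.mem_cons_of_mem _ hq))
      intro cv hcv
      have hple := hps p List.mem_cons_self
      rcases (PySem.Dict.mem_items_insert d p.1 (max (d.getD p.1 p.2) p.2) cv).mp hcv with heq | hmem
      · rw [heq]
        have hgd : d.getD p.1 p.2 ≤ pvLim md p.1 := by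
          rcases hopt : d.get? p.1 with _ | v
          · rw [PySem.Dict.getD_of_get?_eq_none d p.2 hopt]; exact hple
          · rw [PySem.Dict.getD_of_get?_eq_some d p.2 hopt]
            exact hd _ (PySem.Dict.mem_items_of_get?_eq_some d hopt)
        exact max_le hgd hple
      · exact hd cv hmem.1

theorem pvSeen_ok_iff (md : List (String × Int)) (ps : List (String × Int)) :
    ((ps.foldl pvStep PySem.Dict.empty).items.all (fun cv => cv.2 ≤ pvLim md cv.1) = true)
      ↔ ∀ p ∈ ps, p.2 ≤ pvLim md p.1 := by
  constructor
  · intro hall p hp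
    rcases pvStep_covers ps PySem.Dict.empty p hp with ⟨v, hget, hle⟩
    have hmem := PySem.Dict.mem_items_of_get?_eq_some _ hget
    have := List.all_eq_true.mp hall _ hmem
    simp only [decide_eq_true_eq] at this
    omega
  · intro hall
    refine List.all_eq_true.mpr (fun cv hcv => ?_)
    simp only [decide_eq_true_eq]
    refine pvStep_bounded md ps PySem.Dict.empty ?_ hall cv hcv
    intro cv hcv
    simp [PySem.Dict.empty] at hcv

theorem pvGame_iff (md : List (String × Int)) (draws : List (String × String)) :
    (((pvChunks draws).foldl (fun th p => th + pvInd md p) 0) < 1)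
      ↔ (((pvChunks draws).foldl pvStep PySem.Dict.empty).items.all
            (fun cv => cv.2 ≤ (PySem.Dict.mk md).getD cv.1 0) = true) := by
  rw [pvA_zero_iff]
  exact (pvSeen_ok_iff md (pvChunks draws)).symm

theorem pvFold_eq (md : List (String × Int)) (l : List (Int × List (String × String))) (i : Int) :
    l.foldl (fun id_sum g =>
      let too_high : Int := g.2.foldl (fun th rc =>
        ((PySem.Str.split? rc.2 ",").getD []).foldl (fun th draw =>
          th + check_if_too_many ((PySem.Str.split? (PySem.Str.strip draw) " ").getD []) md) th) 0
      if too_high < 1 then id_sum + g.1 else id_sum) i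
    = l.foldl (fun id_sum g =>
      let seen : PySem.Dict String Int := g.2.foldl (fun seen rc =>
        ((PySem.Str.split? rc.2 ",").getD []).foldl (fun seen chunk =>
          let parts := (PySem.Str.split? (PySem.Str.strip chunk) " ").getD []
          let count := (PySem.Int.ofStr? (PySem.List.pyGetD parts 0 "")).getD 0
          let col := PySem.List.pyGetD parts 1 ""
          seen.insert col (max (seen.getD col count) count)) seen) PySem.Dict.empty
      if seen.items.all (fun cv => cv.2 ≤ (PySem.Dict.mk md).getD cv.1 0) then id_sum + g.1 else id_sum) i := by
  induction l generalizing i with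
  | nil => rfl
  | cons g t ih =>
      rw [List.foldl_cons, List.foldl_cons, ih]
      congr 1
      show (let too_high : Int := g.2.foldl _ 0
            if too_high < 1 then i + g.1 else i) = _
      rw [show (g.2.foldl (fun th rc =>
            ((PySem.Str.split? rc.2 ",").getD []).foldl (fun th draw =>
              th + check_if_too_many ((PySem.Str.split? (PySem.Str.strip draw) " ").getD []) md) th) 0)
          = (pvChunks g.2).foldl (fun th p => th + pvInd md p) 0 from pvA_flat md g.2 0]
      rw [show (g.2.foldl (fun seen rc =>
            ((PySem.Str.split? rc.2 ",").getD []).foldl (fun seen chunk =>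
              let parts := (PySem.Str.split? (PySem.Str.strip chunk) " ").getD []
              let count := (PySem.Int.ofStr? (PySem.List.pyGetD parts 0 "")).getD 0
              let col := PySem.List.pyGetD parts 1 ""
              seen.insert col (max (seen.getD col count) count)) seen) PySem.Dict.empty)
          = (pvChunks g.2).foldl pvStep PySem.Dict.empty from pvB_flat g.2 PySem.Dict.empty]
      have hiff := pvGame_iff md g.2
      by_cases hcond : ((pvChunks g.2).foldl (fun th p => th + pvInd md p) 0) < 1
      · rw [if_pos hcond, if_pos (hiff.mp hcond)]
      · rw [if_neg hcond, if_neg (fun hb => hcond (hiff.mpr hb))]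

-- ===== VERDICT (by name: the statement is the Claim_ definition above) =====
theorem find_offenders_spec : Claim_equal_find_offenders := by
  intro game_dict max_dice _hdom _hpre
  unfold Spec_find_offenders find_offenders find_offenders_alt
  exact pvFold_eq max_dice game_dict 0
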